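-- pv_equiv track=rewrite | github.com/ErikG13/PythonDataPipeline | script_IMDE1.py | changeCSV_to_PSV
-- ===== SOURCE A (Python) =====
-- def changeCSV_to_PSV(row_converted, headers):
--     dataset = []
--     register = ''
--     row_converted.insert(0, headers)
--     for row in row_converted:
--         register = str(row).replace('\'','').replace('[','').replace(']','').replace(' ','').replace(',','|')
--         dataset.append(register)
--     register = ''
--     return dataset
-- ===== SOURCE B (Python) =====
-- def changeCSV_to_PSV(row_converted, headers):
--     # Per-row: repr each cell, drop ' [ ] space and turn ',' into '|' in one
--     # character scan, then join the cells with '|' (which is what the ", "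
--     # separators of str(row) become under A's replace chain).
--     row_converted.insert(0, headers)
--     drop = {"'", '[', ']', ' '}
--     dataset = []
--     for row in row_converted:
--         cells = []
--         for e in row:
--             cells.append(''.join('|' if c == ',' else c
--                                  for c in repr(e) if c not in drop))
--         dataset.append('|'.join(cells))
--     return dataset
-- ===== Notes on version B (the rewrite author's own statement) =====
-- stated objective: alternative
-- what changed: Instead of A's five sequential whole-string replace passes over str(row), B reprs each cell separately, transforms it in a single character scan (drop-set membership, ',' -> '|'), and joins the cells with '|'.
import Mathlib
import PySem

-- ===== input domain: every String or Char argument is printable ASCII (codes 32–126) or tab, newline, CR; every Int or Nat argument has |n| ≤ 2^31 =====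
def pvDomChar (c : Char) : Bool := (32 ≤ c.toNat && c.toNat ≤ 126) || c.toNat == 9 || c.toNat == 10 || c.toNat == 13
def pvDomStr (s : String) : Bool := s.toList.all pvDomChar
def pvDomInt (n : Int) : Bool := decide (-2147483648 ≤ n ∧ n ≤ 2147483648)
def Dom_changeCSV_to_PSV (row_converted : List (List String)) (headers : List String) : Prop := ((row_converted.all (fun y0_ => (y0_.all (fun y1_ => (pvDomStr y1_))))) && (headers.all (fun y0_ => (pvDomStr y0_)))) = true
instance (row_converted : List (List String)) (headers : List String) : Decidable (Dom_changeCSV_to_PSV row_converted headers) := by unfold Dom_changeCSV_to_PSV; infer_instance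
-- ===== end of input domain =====

-- B rebuilds each output row cell-by-cell (repr each cell, one character scan, join
-- with '|') instead of A's five whole-string str(row).replace passes; objective:
-- alternative decomposition, same cost. Both Pythons mutate row_converted by
-- row_converted.insert(0, headers); the equivalence proved here is about the
-- RETURN value (the mutation is identical in A and B).

-- shared helper (the Python builtin repr of a str, exact for strings whose
-- characters are printable ASCII or tab/newline/CR, i.e. on Dom):
-- Python picks a single quote unless the string contains ' and no ",
-- and escapes backslash, the quote and tab/newline/CR.
def pvEsc (q : Char) (c : Char) : List Char :=
  if c = '\\' then ['\\', '\\']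
  else if c = q then ['\\', q]
  else if c = '\t' then ['\\', 't']
  else if c = '\n' then ['\\', 'n']
  else if c = '\r' then ['\\', 'r']
  else [c]

def pvRepr (s : String) : List Char :=
  let cs := s.toList
  let q : Char := if cs.contains '\'' && !(cs.contains '"') then '"' else '\''
  q :: cs.flatMap (pvEsc q) ++ [q]

-- str(row) for a Python list of strings: '[' + ", ".join(repr(cell)) + ']'
def pvStrOfRow (row : List String) : List Char :=
  '[' :: PySem.Chars.join [',', ' '] (row.map pvRepr) ++ [']']

-- ===== PORT A =====
def changeCSV_to_PSV (row_converted : List (List String)) (headers : List String) : List String :=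
  -- dataset = []; row_converted.insert(0, headers); for row in ...: register = str(row).replace(...)...; dataset.append(register)
  (headers :: row_converted).foldl
    (fun dataset row =>
      dataset ++ [PySem.Str.replace (PySem.Str.replace (PySem.Str.replace (PySem.Str.replace
        (PySem.Str.replace (String.ofList (pvStrOfRow row)) "'" "") "[" "") "]" "") " " "") "," "|"])
    []

-- ===== PORT B =====
def pvDrop : PySem.Set Char := PySem.Set.ofList ['\'', '[', ']', ' ']

def pvProcChar (c : Char) : Option Char :=
  if PySem.Set.contains pvDrop c then none
  else if c = ',' then some '|'
  else some c

def changeCSV_to_PSV_alt (row_converted : List (List String)) (headers : List String) : List String :=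
  (headers :: row_converted).map (fun row =>
    PySem.Str.join "|" (row.map (fun e => String.ofList ((pvRepr e).filterMap pvProcChar))))

-- ===== PRECONDITION & SPEC =====
def Spec_changeCSV_to_PSV (row_converted : List (List String)) (headers : List String) (out : List String) : Prop := out = changeCSV_to_PSV_alt row_converted headers
instance (row_converted : List (List String)) (headers : List String) (out : List String) : Decidable (Spec_changeCSV_to_PSV row_converted headers out) := by unfold Spec_changeCSV_to_PSV; infer_instance

-- ===== CLAIM (what is proved, stated in full; the proofs are below) =====
def Claim_equal_changeCSV_to_PSV : Prop := ∀ (row_converted : List (List String)) (headers : List String), Dom_changeCSV_to_PSV row_converted headers → Spec_changeCSV_to_PSV row_converted headers (changeCSV_to_PSV row_converted headers)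

-- ===== LEMMAS AND PROOFS =====

-- replacing a single-character pattern is a flatMap with this substitution
def pvRsub (a : Char) (new : List Char) (c : Char) : List Char :=
  if c = a then new else [c]

-- the combined character map of A's five replace passes
def pvF (c : Char) : List Char := (pvProcChar c).toList

theorem pv_go_single (a : Char) (new : List Char) (l : List Char) :
    ∀ (acc : List Char) (fuel : Nat), l.length ≤ fuel →
      PySem.Chars.replace.go [a] new fuel l acc = acc.reverse ++ l.flatMap (pvRsub a new) := by
  induction l with
  | nil =>
      intro acc fuel _
      cases fuel <;> simp [PySem.Chars.replace.go]
  | cons c t ih =>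
      intro acc fuel h
      cases fuel with
      | zero => simp at h
      | succ f =>
        rw [PySem.Chars.replace.go]
        by_cases hc : c = a
        · subst hc
          have hp : [c].isPrefixOf (c :: t) = true := by simp [List.isPrefixOf]
          simp only [hp, if_true]
          have hd : List.drop [c].length (c :: t) = t := rfl
          rw [hd, ih (new.reverse ++ acc) f (by simpa using Nat.lt_succ_iff.mp (Nat.lt_of_lt_of_le (Nat.lt_succ_self _) h))]
          simp [pvRsub]
        · have hp : [a].isPrefixOf (c :: t) = false := by
            simp [List.isPrefixOf]; exact fun h' => (hc h'.symm).elim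
          simp only [hp]
          rw [if_neg (by simp)]
          rw [ih (c :: acc) f (by simpa using Nat.lt_succ_iff.mp (Nat.lt_of_lt_of_le (Nat.lt_succ_self _) h))]
          simp [pvRsub, hc]

theorem pv_replace_single (l : List Char) (a : Char) (new : List Char) :
    PySem.Chars.replace l [a] new = l.flatMap (pvRsub a new) := by
  have h := pv_go_single a new l [] l.length le_rfl
  simpa [PySem.Chars.replace] using h

theorem pv_chain (l : List Char) :
    PySem.Chars.replace (PySem.Chars.replace (PySem.Chars.replace (PySem.Chars.replace
      (PySem.Chars.replace l ['\''] []) ['['] []) [']'] []) [' '] []) [','] ['|']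
    = l.flatMap pvF := by
  simp only [pv_replace_single, List.flatMap_assoc]
  congr 1
  funext c
  by_cases h1 : c = '\''; · subst h1; decide
  by_cases h2 : c = '['; · subst h2; decide
  by_cases h3 : c = ']'; · subst h3; decide
  by_cases h4 : c = ' '; · subst h4; decide
  by_cases h5 : c = ','; · subst h5; decide
  simp [pvRsub, pvF, pvProcChar, pvDrop, PySem.Set.ofList, PySem.Set.add, PySem.Set.contains,
    h1, h2, h3, h4, h5]

theorem pv_flatMap_intercalate (f : Char → List Char) (sep : List Char) :
    ∀ parts : List (List Char),
      (sep.intercalate parts).flatMap f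
        = (sep.flatMap f).intercalate (parts.map (fun p => p.flatMap f))
  | [] => by simp [List.intercalate]
  | [a] => by simp [List.intercalate]
  | a :: b :: r => by
      have ih := pv_flatMap_intercalate f sep (b :: r)
      simp only [List.intercalate, List.intersperse] at ih ⊢
      simp_all [List.flatMap_append]

theorem pv_filterMap_eq_flatMap (l : List Char) :
    l.filterMap pvProcChar = l.flatMap pvF := by
  induction l with
  | nil => rfl
  | cons c t ih =>
      cases h : pvProcChar c <;> simp [h, ih, pvF]

theorem pvF_lb : pvF '[' = [] := by decide
theorem pvF_rb : pvF ']' = [] := by decide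
theorem pvF_sep : [',', ' '].flatMap pvF = ['|'] := by decide

theorem pv_row (row : List String) :
    PySem.Str.replace (PySem.Str.replace (PySem.Str.replace (PySem.Str.replace
        (PySem.Str.replace (String.ofList (pvStrOfRow row)) "'" "") "[" "") "]" "") " " "") "," "|"
      = PySem.Str.join "|" (row.map (fun e => String.ofList ((pvRepr e).filterMap pvProcChar))) := by
  rw [← String.toList_inj]
  simp only [PySem.Str.toList_replace, PySem.Str.toList_join]
  have hl : (String.ofList (pvStrOfRow row)).toList = pvStrOfRow row := by simp
  rw [hl]
  show PySem.Chars.replace _ _ _ = _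
  rw [show ("'" : String).toList = ['\''] from rfl, show ("[" : String).toList = ['['] from rfl,
      show ("]" : String).toList = [']'] from rfl, show (" " : String).toList = [' '] from rfl,
      show ("," : String).toList = [','] from rfl, show ("|" : String).toList = ['|'] from rfl,
      show ("" : String).toList = [] from rfl]
  rw [pv_chain]
  unfold pvStrOfRow
  simp only [List.flatMap_cons, List.flatMap_append, pvF_lb, pvF_rb, List.nil_append,
    List.flatMap_nil, List.append_nil]
  unfold PySem.Chars.join
  rw [pv_flatMap_intercalate, pvF_sep]
  simp [pv_filterMap_eq_flatMap, Function.comp_def]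

theorem pv_foldl_append {α β : Type} (g : α → β) :
    ∀ (l : List α) (acc : List β),
      l.foldl (fun d r => d ++ [g r]) acc = acc ++ l.map g
  | [], acc => by simp
  | x :: t, acc => by simp [pv_foldl_append g t]

-- ===== VERDICT (by name: the statement is the Claim_ definition above) =====
theorem changeCSV_to_PSV_spec : Claim_equal_changeCSV_to_PSV := by
  intro row_converted headers _
  unfold Spec_changeCSV_to_PSV changeCSV_to_PSV changeCSV_to_PSV_alt
  rw [pv_foldl_append]
  simp only [List.nil_append, pv_row]
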